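-- pv_equiv track=rewrite | github.com/slauger/chantal | src/chantal/plugins/apt/parsers.py | parse_rfc822_stanza
-- ===== SOURCE A (Python) =====
-- def parse_rfc822_stanza(text: str) -> dict[str, str]:
--     """
--     Parse a single RFC822 stanza into a dictionary.
--
--     Args:
--         text: RFC822-formatted text (single stanza)
--
--     Returns:
--         Dictionary of field names to values
--
--     Example:
--         >>> stanza = '''Package: nginx
--         ... Version: 1.18.0
--         ... Description: Small, powerful, scalable web/proxy server
--         ...  This is a multi-line
--         ...  description.'''
--         >>> result = parse_rfc822_stanza(stanza)
--         >>> result['Package']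
--         'nginx'
--         >>> result['Description']
--         'Small, powerful, scalable web/proxy server\\nThis is a multi-line\\ndescription.'
--     """
--     fields: dict[str, str] = {}
--     current_field: str | None = None
--     current_value: list[str] = []
--
--     for line in text.split("\n"):
--         # Continuation line (starts with space or tab)
--         if line and line[0] in (" ", "\t"):
--             if current_field:
--                 # Remove leading space and add to current value
--                 continuation = line[1:] if len(line) > 1 else ""
--                 # Handle "." as paragraph separator
--                 if continuation == ".":
--                     current_value.append("")
--                 else:
--                     current_value.append(continuation)
--         # New field (contains colon)
--         elif ":" in line:
--             # Save previous field if exists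
--             if current_field:
--                 fields[current_field] = "\n".join(current_value)
--             # Parse new field
--             field_name, _, field_value = line.partition(":")
--             current_field = field_name.strip()
--             current_value = [field_value.strip()] if field_value.strip() else []
--         # Empty line or malformed - skip
--         else:
--             continue
--
--     # Save final field
--     if current_field:
--         fields[current_field] = "\n".join(current_value)
--
--     return fields
-- ===== SOURCE B (Python) =====
-- def parse_rfc822_stanza(text: str) -> dict[str, str]:
--     """Two-pass parser: first group the lines into field blocks, then render each block."""
--     # Pass 1: group lines into blocks, each a header line plus its continuation lines.
--     blocks: list[list[str]] = []
--     for line in text.split("\n"):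
--         if line[:1] in (" ", "\t"):
--             if blocks:
--                 blocks[-1].append(line)
--         elif ":" in line:
--             blocks.append([line])
--         # other lines (empty / malformed) are skipped
--     # Pass 2: render each block; later duplicate names overwrite earlier ones in place.
--     fields: dict[str, str] = {}
--     for header, *conts in blocks:
--         name, _, value = header.partition(":")
--         name = name.strip()
--         if not name:
--             continue
--         parts = [value.strip()] if value.strip() else []
--         for cont in conts:
--             tail = cont[1:]
--             parts.append("" if tail == "." else tail)
--         fields[name] = "\n".join(parts)
--     return fields
-- ===== Notes on version B (the rewrite author's own statement) =====
-- stated objective: alternative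
-- what changed: Replaces A's single stateful loop (current-field/current-value carried across lines with deferred saves) by a two-pass decomposition: pass 1 groups the lines into field blocks (header plus its continuation lines), pass 2 renders each block independently into the dict.
import Mathlib
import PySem

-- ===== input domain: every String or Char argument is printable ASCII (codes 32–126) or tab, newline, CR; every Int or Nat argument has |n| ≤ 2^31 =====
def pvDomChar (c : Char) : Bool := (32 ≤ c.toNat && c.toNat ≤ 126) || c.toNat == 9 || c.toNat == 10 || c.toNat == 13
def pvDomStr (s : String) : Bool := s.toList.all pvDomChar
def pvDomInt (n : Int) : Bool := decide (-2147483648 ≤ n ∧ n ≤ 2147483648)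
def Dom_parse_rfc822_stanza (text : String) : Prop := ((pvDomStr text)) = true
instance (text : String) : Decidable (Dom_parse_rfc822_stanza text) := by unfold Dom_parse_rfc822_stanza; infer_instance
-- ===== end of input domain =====

-- B re-groups the lines into field blocks in one pass and renders each block in a second pass
-- (a different decomposition of the same parse, same cost).

-- shared exact primitive: str.partition(":") giving (part before first ':', part after it);
-- when ':' is absent it returns (s, "") — exactly partition's first and third components.
def pvPartitionColon : List Char → List Char × List Char
  | [] => ([], [])
  | c :: rest =>
    if c = ':' then ([], rest)
    else
      let p := pvPartitionColon rest
      (c :: p.1, p.2)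

-- ===== PORT A =====

-- Python truthiness of `current_field : str | None`
def pvTruthy : Option (List Char) → Bool
  | none => false
  | some s => !s.isEmpty

-- `line and line[0] in (" ", "\t")`
def pvIsContA (line : List Char) : Bool :=
  match line with
  | [] => false
  | c :: _ => c = ' ' || c = '\t'

abbrev pvAState : Type :=
  PySem.Dict (List Char) (List Char) × Option (List Char) × List (List Char)

-- one iteration of A's `for line in text.split("\n")` loop over (fields, current_field, current_value)
def pvAStep (st : pvAState) (line : List Char) : pvAState :=
  if pvIsContA line then
    if pvTruthy st.2.1 then
      let continuation :=
        if 1 < PySem.Chars.len line then PySem.Chars.slice line (some 1) none else []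
      if continuation = ['.'] then (st.1, st.2.1, st.2.2 ++ [[]])
      else (st.1, st.2.1, st.2.2 ++ [continuation])
    else st
  else if PySem.Chars.isIn [':'] line then
    let fields :=
      if pvTruthy st.2.1 then st.1.insert (st.2.1.getD []) (PySem.Chars.join ['\n'] st.2.2)
      else st.1
    let p := pvPartitionColon line
    let field_value := PySem.Chars.strip p.2
    (fields, some (PySem.Chars.strip p.1), if field_value ≠ [] then [field_value] else [])
  else st

-- `fields[current_field] = "\n".join(current_value)` guarded by truthiness (the final save)
def pvASave (st : pvAState) : PySem.Dict (List Char) (List Char) :=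
  if pvTruthy st.2.1 then st.1.insert (st.2.1.getD []) (PySem.Chars.join ['\n'] st.2.2)
  else st.1

def parse_rfc822_stanza (text : String) : List (String × String) :=
  (pvASave ((PySem.Chars.splitOn text.toList ['\n']).foldl pvAStep
      (PySem.Dict.empty, none, []))).items.map
    (fun p => (String.ofList p.1, String.ofList p.2))

-- ===== PORT B =====

-- `line[:1] in (" ", "\t")`
def pvIsContB (line : List Char) : Bool :=
  PySem.Chars.slice line none (some 1) = [' '] || PySem.Chars.slice line none (some 1) = ['\t']

-- pass 1 step: start a block on a header line, append a continuation to the last block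
def pvGroupStep (blocks : List (List (List Char))) (line : List Char) : List (List (List Char)) :=
  if pvIsContB line then
    match blocks.getLast? with
    | none => blocks
    | some last => blocks.dropLast ++ [last ++ [line]]
  else if PySem.Chars.isIn [':'] line then blocks ++ [[line]]
  else blocks

-- the value parts of a block: initial value from the header, then the continuation tails
def pvBlockParts (header : List Char) (conts : List (List Char)) : List (List Char) :=
  let value := PySem.Chars.strip (pvPartitionColon header).2
  conts.foldl
    (fun parts cont =>
      let tail := PySem.Chars.slice cont (some 1) none
      parts ++ [if tail = ['.'] then [] else tail])
    (if value ≠ [] then [value] else [])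

-- pass 2 step: render one block into the dict (empty-name blocks are skipped)
def pvRenderBlock (fields : PySem.Dict (List Char) (List Char)) (block : List (List Char)) :
    PySem.Dict (List Char) (List Char) :=
  match block with
  | [] => fields
  | header :: conts =>
    let name := PySem.Chars.strip (pvPartitionColon header).1
    if name = [] then fields
    else fields.insert name (PySem.Chars.join ['\n'] (pvBlockParts header conts))

def parse_rfc822_stanza_alt (text : String) : List (String × String) :=
  (((PySem.Chars.splitOn text.toList ['\n']).foldl pvGroupStep []).foldl pvRenderBlock
      PySem.Dict.empty).items.map
    (fun p => (String.ofList p.1, String.ofList p.2))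

-- ===== PRECONDITION & SPEC =====
def Spec_parse_rfc822_stanza (text : String) (out : List (String × String)) : Prop := out = parse_rfc822_stanza_alt text
instance (text : String) (out : List (String × String)) : Decidable (Spec_parse_rfc822_stanza text out) := by unfold Spec_parse_rfc822_stanza; infer_instance

-- ===== CLAIM (what is proved, stated in full; the proofs are below) =====
def Claim_equal_parse_rfc822_stanza : Prop := ∀ (text : String), Dom_parse_rfc822_stanza text → Spec_parse_rfc822_stanza text (parse_rfc822_stanza text)

-- ===== LEMMAS AND PROOFS =====

-- the two line classifications agree
lemma pvIsCont_eq (line : List Char) : pvIsContB line = pvIsContA line := by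
  have h1 : PySem.List.slice line none (some 1) = line.take 1 := by
    have := PySem.List.slice_to (xs := line) (b := 1) (by omega)
    simpa using this
  cases line with
  | nil => simp [pvIsContA, pvIsContB, h1]
  | cons c rest => simp [pvIsContA, pvIsContB, h1]

lemma pvSlice1_tail (l : List Char) : PySem.List.slice l (some 1) none = l.tail := by
  simpa using PySem.List.slice_from_one (xs := l)

-- A's continuation expression is the tail of the line
lemma pvContExpr_eq (line : List Char) :
    (if 1 < line.length then PySem.List.slice line (some 1) none else []) = line.tail := by
  cases line with
  | nil => simp
  | cons c rest => cases rest <;> simp [pvSlice1_tail]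

-- appending one continuation line to a block appends one rendered part
lemma pvBlockParts_append (header : List Char) (conts : List (List Char)) (line : List Char) :
    pvBlockParts header (conts ++ [line]) =
      pvBlockParts header conts ++ [if line.tail = ['.'] then [] else line.tail] := by
  simp [pvBlockParts, List.foldl_append, pvSlice1_tail]

-- invariant relating A's loop state to B's blocks-so-far
def pvInv (d : PySem.Dict (List Char) (List Char)) (cf : Option (List Char))
    (cv : List (List Char)) (blocks : List (List (List Char))) : Prop :=
  match cf with
  | none => blocks = [] ∧ cv = [] ∧ d = PySem.Dict.empty
  | some name => ∃ closed header conts,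
      blocks = closed ++ [header :: conts] ∧
      closed.foldl pvRenderBlock PySem.Dict.empty = d ∧
      PySem.Chars.strip (pvPartitionColon header).1 = name ∧
      (name ≠ [] → pvBlockParts header conts = cv)

-- rendering the pending block performs exactly A's save
lemma pvRender_pending (d : PySem.Dict (List Char) (List Char)) (name : List Char)
    (header : List Char) (conts cv : List (List Char))
    (hn : PySem.Chars.strip (pvPartitionColon header).1 = name)
    (hp : name ≠ [] → pvBlockParts header conts = cv) :
    pvRenderBlock d (header :: conts) = pvASave (d, some name, cv) := by
  by_cases h : name = []
  · subst h
    simp [pvRenderBlock, pvASave, pvTruthy, hn]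
  · have hne : ¬ (!name.isEmpty) = false := by
      simp [List.isEmpty_iff]; exact h
    simp [pvRenderBlock, pvASave, pvTruthy, hn, h, hp h, hne]

lemma pvMain : ∀ (rest : List (List Char)) (d : PySem.Dict (List Char) (List Char))
    (cf : Option (List Char)) (cv : List (List Char)) (blocks : List (List (List Char))),
    pvInv d cf cv blocks →
    pvASave (rest.foldl pvAStep (d, cf, cv)) =
      (rest.foldl pvGroupStep blocks).foldl pvRenderBlock PySem.Dict.empty := by
  intro rest
  induction rest with
  | nil =>
    intro d cf cv blocks hinv
    cases cf with
    | none =>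
      obtain ⟨hb, hv, hd⟩ := hinv
      subst hb; subst hd
      simp [pvASave, pvTruthy]
    | some name =>
      obtain ⟨closed, header, conts, hb, hd, hn, hp⟩ := hinv
      subst hb
      simp only [List.foldl_nil, List.foldl_append, List.foldl_cons, hd]
      exact (pvRender_pending d name header conts cv hn hp).symm
  | cons line rest ih =>
    intro d cf cv blocks hinv
    simp only [List.foldl_cons]
    by_cases hcont : pvIsContA line = true
    · -- continuation line
      have hcB : pvIsContB line = true := by rw [pvIsCont_eq]; exact hcont
      cases cf with
      | none =>
        obtain ⟨hb, hv, hd⟩ := hinv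
        subst hb
        have hA : pvAStep (d, none, cv) line = (d, none, cv) := by
          simp [pvAStep, hcont, pvTruthy]
        have hB : pvGroupStep [] line = [] := by
          simp [pvGroupStep, hcB]
        rw [hA, hB]
        exact ih d none cv [] ⟨rfl, hv, hd⟩
      | some name =>
        obtain ⟨closed, header, conts, hb, hd, hn, hp⟩ := hinv
        subst hb
        have hB : pvGroupStep (closed ++ [header :: conts]) line =
            closed ++ [header :: (conts ++ [line])] := by
          simp [pvGroupStep, hcB]
        rw [hB]
        by_cases hname : name = []
        · -- empty field name: A drops the line, B's block stays dropped
          subst hname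
          have hA : pvAStep (d, some [], cv) line = (d, some [], cv) := by
            simp [pvAStep, hcont, pvTruthy]
          rw [hA]
          refine ih d (some []) cv _ ⟨closed, header, conts ++ [line], rfl, hd, hn, ?_⟩
          intro h; exact absurd rfl h
        · -- real field: the appended part matches
          have htr : pvTruthy (some name) = true := by
            simp [pvTruthy]; exact hname
          have hA : pvAStep (d, some name, cv) line =
              (d, some name, cv ++ [if line.tail = ['.'] then [] else line.tail]) := by
            by_cases hdot : line.tail = ['.'] <;>
              simp [pvAStep, hcont, htr, pvContExpr_eq, hdot]
          rw [hA]
          refine ih d (some name) _ _ ⟨closed, header, conts ++ [line], rfl, hd, hn, ?_⟩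
          intro _
          rw [← hp hname, pvBlockParts_append]
    · by_cases hcolon : PySem.Chars.isIn [':'] line = true
      · -- header line
        have hcB : pvIsContB line = false := by
          rw [pvIsCont_eq]; exact eq_false_of_ne_true hcont
        have hB : pvGroupStep blocks line = blocks ++ [[line]] := by
          simp [pvGroupStep, hcB, hcolon]
        have hA : pvAStep (d, cf, cv) line =
            (pvASave (d, cf, cv), some (PySem.Chars.strip (pvPartitionColon line).1),
              if PySem.Chars.strip (pvPartitionColon line).2 ≠ []
              then [PySem.Chars.strip (pvPartitionColon line).2] else []) := by
          simp [pvAStep, eq_false_of_ne_true hcont, hcolon, pvASave]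
        rw [hA, hB]
        have hclosed : blocks.foldl pvRenderBlock PySem.Dict.empty = pvASave (d, cf, cv) := by
          cases cf with
          | none =>
            obtain ⟨hb, hv, hd⟩ := hinv
            subst hb; subst hd
            simp [pvASave, pvTruthy]
          | some name =>
            obtain ⟨closed, header, conts, hb, hd, hn, hp⟩ := hinv
            subst hb
            simp only [List.foldl_append, List.foldl_cons, List.foldl_nil, hd]
            exact pvRender_pending d name header conts cv hn hp
        refine ih _ (some (PySem.Chars.strip (pvPartitionColon line).1)) _ _
          ⟨blocks, line, [], rfl, hclosed, rfl, ?_⟩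
        intro _
        simp [pvBlockParts]
      · -- skip line
        have hcB : pvIsContB line = false := by
          rw [pvIsCont_eq]; exact eq_false_of_ne_true hcont
        have hA : pvAStep (d, cf, cv) line = (d, cf, cv) := by
          simp [pvAStep, eq_false_of_ne_true hcont, eq_false_of_ne_true hcolon]
        have hB : pvGroupStep blocks line = blocks := by
          simp [pvGroupStep, hcB, eq_false_of_ne_true hcolon]
        rw [hA, hB]
        exact ih d cf cv blocks hinv

-- ===== VERDICT (by name: the statement is the Claim_ definition above) =====
theorem parse_rfc822_stanza_spec : Claim_equal_parse_rfc822_stanza := by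
  intro text _
  unfold Spec_parse_rfc822_stanza parse_rfc822_stanza parse_rfc822_stanza_alt
  rw [pvMain (PySem.Chars.splitOn text.toList ['\n']) PySem.Dict.empty none [] []
      ⟨rfl, rfl, rfl⟩]
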